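-- pv_equiv track=rewrite | github.com/AthharPro/zypher | python-scanner/zypher_scanner/db_ruls/cicd-vuln-008.py | _find_step_line_number
-- ===== SOURCE A (Python) =====
-- from typing import List, Dict, Any, Optional
--
-- def _find_step_line_number(file_lines: List[str], job_name: str, step_index: int) -> int:
--     job_line = -1
--     steps_line = -1
--     step_count = -1
--     for i, line in enumerate(file_lines):
--         if line.strip().startswith(f"{job_name}:"):
--             job_line = i
--             break
--     if job_line < 0:
--         return -1
--     for i in range(job_line, len(file_lines)):
--         if "steps:" in file_lines[i]:
--             steps_line = i
--             break
--     if steps_line < 0: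
--         return -1
--     for i in range(steps_line + 1, len(file_lines)):
--         if file_lines[i].strip().startswith("- "):
--             step_count += 1
--             if step_count == step_index:
--                 return i
--     return -1
-- ===== SOURCE B (Python) =====
-- def _find_step_line_number(file_lines, job_name, step_index):
--     # single pass with a phase state: 0 = find job header, 1 = find steps:, 2 = count steps
--     phase = 0
--     count = -1
--     for i, line in enumerate(file_lines):
--         if phase == 0:
--             if line.strip().startswith(f"{job_name}:"):
--                 # the job-header line itself may also carry "steps:" (A scans it too)
--                 phase = 2 if "steps:" in line else 1
--         elif phase == 1:
--             if "steps:" in line: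
--                 phase = 2
--         else:
--             if line.strip().startswith("- "):
--                 count += 1
--                 if count == step_index:
--                     return i
--     return -1
-- ===== Notes on version B (the rewrite author's own statement) =====
-- stated objective: simpler
-- what changed: Replaced A's three separate forward scans (enumerate loop, then two index-range loops re-reading file_lines[i]) by one single pass over enumerate(file_lines) driven by a phase state machine with a step counter.
import Mathlib
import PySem

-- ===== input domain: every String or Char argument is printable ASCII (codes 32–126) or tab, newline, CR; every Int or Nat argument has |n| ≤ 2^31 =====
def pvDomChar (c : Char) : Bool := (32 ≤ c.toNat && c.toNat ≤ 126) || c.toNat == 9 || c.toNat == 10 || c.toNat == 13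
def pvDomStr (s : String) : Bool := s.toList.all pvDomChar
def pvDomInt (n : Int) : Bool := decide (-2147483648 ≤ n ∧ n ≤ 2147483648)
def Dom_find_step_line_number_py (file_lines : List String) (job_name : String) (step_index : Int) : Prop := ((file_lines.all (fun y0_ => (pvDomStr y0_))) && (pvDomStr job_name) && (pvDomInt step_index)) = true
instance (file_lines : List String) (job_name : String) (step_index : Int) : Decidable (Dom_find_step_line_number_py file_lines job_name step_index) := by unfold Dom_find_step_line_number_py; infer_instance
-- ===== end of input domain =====

-- B replaces A's three separate forward scans by one single-pass phase state machine; objective: simpler.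

-- ===== PORT A =====
-- first loop: for i, line in enumerate(file_lines): if line.strip().startswith(job_name+":"): break
def pvA_loop1 (lines : List String) (job_name : String) (i : Nat) : Int :=
  match lines with
  | [] => -1
  | line :: rest =>
    if PySem.Str.startswith (PySem.Str.strip line) (job_name ++ ":") then (i : Int)
    else pvA_loop1 rest job_name (i + 1)

-- second loop: for i in range(job_line, len(file_lines)): if "steps:" in file_lines[i]: break
def pvA_loop2 (file_lines : List String) (i : Nat) : Int :=
  if h : i < file_lines.length then
    if PySem.Str.isIn "steps:" file_lines[i] then (i : Int)
    else pvA_loop2 file_lines (i + 1)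
  else -1
termination_by file_lines.length - i

-- third loop: for i in range(steps_line+1, len): count steps "- ", return i when count hits step_index
def pvA_loop3 (file_lines : List String) (i : Nat) (step_count step_index : Int) : Int :=
  if h : i < file_lines.length then
    if PySem.Str.startswith (PySem.Str.strip file_lines[i]) "- " then
      if step_count + 1 = step_index then (i : Int)
      else pvA_loop3 file_lines (i + 1) (step_count + 1) step_index
    else pvA_loop3 file_lines (i + 1) step_count step_index
  else -1
termination_by file_lines.length - i

def find_step_line_number_py (file_lines : List String) (job_name : String) (step_index : Int) : Int :=
  let job_line := pvA_loop1 file_lines job_name 0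
  if job_line < 0 then -1
  else
    let steps_line := pvA_loop2 file_lines job_line.toNat
    if steps_line < 0 then -1
    else pvA_loop3 file_lines (steps_line.toNat + 1) (-1) step_index

-- ===== PORT B =====
-- single pass: phase 0 = find job header, 1 = find "steps:", 2 = count "- " steps
def pvB_go (lines : List String) (job_name : String) (step_index : Int) (i : Nat) (phase : Nat) (count : Int) : Int :=
  match lines with
  | [] => -1
  | line :: rest =>
    if phase = 0 then
      if PySem.Str.startswith (PySem.Str.strip line) (job_name ++ ":") then
        if PySem.Str.isIn "steps:" line then pvB_go rest job_name step_index (i + 1) 2 count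
        else pvB_go rest job_name step_index (i + 1) 1 count
      else pvB_go rest job_name step_index (i + 1) 0 count
    else if phase = 1 then
      if PySem.Str.isIn "steps:" line then pvB_go rest job_name step_index (i + 1) 2 count
      else pvB_go rest job_name step_index (i + 1) 1 count
    else
      if PySem.Str.startswith (PySem.Str.strip line) "- " then
        if count + 1 = step_index then (i : Int)
        else pvB_go rest job_name step_index (i + 1) 2 (count + 1)
      else pvB_go rest job_name step_index (i + 1) 2 count

def find_step_line_number_py_alt (file_lines : List String) (job_name : String) (step_index : Int) : Int :=
  pvB_go file_lines job_name step_index 0 0 (-1)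

-- ===== PRECONDITION & SPEC =====
def Spec_find_step_line_number_py (file_lines : List String) (job_name : String) (step_index : Int) (out : Int) : Prop := out = find_step_line_number_py_alt file_lines job_name step_index
instance (file_lines : List String) (job_name : String) (step_index : Int) (out : Int) : Decidable (Spec_find_step_line_number_py file_lines job_name step_index out) := by unfold Spec_find_step_line_number_py; infer_instance

-- ===== CLAIM (what is proved, stated in full; the proofs are below) =====
def Claim_equal_find_step_line_number_py : Prop := ∀ (file_lines : List String) (job_name : String) (step_index : Int), Dom_find_step_line_number_py file_lines job_name step_index → Spec_find_step_line_number_py file_lines job_name step_index (find_step_line_number_py file_lines job_name step_index)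

-- ===== LEMMAS AND PROOFS =====

theorem pv_drop_cons {α : Type} {fl : List α} {i : Nat} {x : α} {rest : List α}
    (h : fl.drop i = x :: rest) :
    ∃ (hi : i < fl.length), fl[i] = x ∧ fl.drop (i + 1) = rest := by
  have hi : i < fl.length := by
    by_contra hle
    rw [List.drop_eq_nil_of_le (by omega)] at h
    simp at h
  have hd := List.drop_eq_getElem_cons hi
  rw [h] at hd
  obtain ⟨h1, h2⟩ := List.cons.injEq _ _ _ _ ▸ hd
  exact ⟨hi, h1.symm, h2.symm⟩

-- phase 2 of B computes A's third loop
theorem pvB_phase2 (fl : List String) (jn : String) (si : Int) :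
    ∀ (lines : List String) (i : Nat) (count : Int), fl.drop i = lines →
      pvB_go lines jn si i 2 count = pvA_loop3 fl i count si := by
  intro lines
  induction lines with
  | nil =>
    intro i count h
    have hni : ¬ i < fl.length := by
      intro hi
      have := List.length_drop (i := i) (l := fl)
      simp [h] at this; omega
    rw [pvA_loop3]; simp [pvB_go, hni]
  | cons line rest ih =>
    intro i count h
    obtain ⟨hi, hget, hdrop⟩ := pv_drop_cons h
    rw [pvA_loop3]
    simp only [pvB_go, hi, hget, dif_pos, reduceIte, Nat.succ_ne_zero, OfNat.ofNat_ne_one]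
    split_ifs with h1 h2 <;>
      simp only [ih (i + 1) _ hdrop]

-- phase 1 of B computes A's second loop composed with the third
theorem pvB_phase1 (fl : List String) (jn : String) (si : Int) :
    ∀ (lines : List String) (i : Nat) (count : Int), fl.drop i = lines →
      pvB_go lines jn si i 1 count =
        (let sl := pvA_loop2 fl i
         if sl < 0 then -1 else pvA_loop3 fl (sl.toNat + 1) count si) := by
  intro lines
  induction lines with
  | nil =>
    intro i count h
    have hni : ¬ i < fl.length := by
      intro hi
      have := List.length_drop (i := i) (l := fl)
      simp [h] at this; omega
    rw [pvA_loop2]; simp [pvB_go, hni]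
  | cons line rest ih =>
    intro i count h
    obtain ⟨hi, hget, hdrop⟩ := pv_drop_cons h
    rw [pvA_loop2]
    simp only [pvB_go, hi, hget, dif_pos, reduceIte, Nat.succ_ne_zero, OfNat.ofNat_ne_one]
    by_cases hs : PySem.Str.isIn "steps:" line = true
    · simp only [hs, if_pos]
      rw [pvB_phase2 fl jn si rest (i + 1) count hdrop]
      rw [if_neg (by omega : ¬ ((i : Int) < 0))]
      simp only [Int.toNat_natCast]
    · simp only [hs, Bool.false_eq_true, reduceIte]
      exact ih (i + 1) count hdrop

-- phase 0 of B computes A's whole pipeline from position i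
theorem pvB_phase0 (fl : List String) (jn : String) (si : Int) :
    ∀ (lines : List String) (i : Nat), fl.drop i = lines →
      pvB_go lines jn si i 0 (-1) =
        (let jl := pvA_loop1 lines jn i
         if jl < 0 then -1
         else
           let sl := pvA_loop2 fl jl.toNat
           if sl < 0 then -1 else pvA_loop3 fl (sl.toNat + 1) (-1) si) := by
  intro lines
  induction lines with
  | nil => intro i h; simp [pvB_go, pvA_loop1]
  | cons line rest ih =>
    intro i h
    obtain ⟨hi, hget, hdrop⟩ := pv_drop_cons h
    by_cases hj : PySem.Str.startswith (PySem.Str.strip line) (jn ++ ":") = true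
    · simp only [pvB_go, pvA_loop1, hj, if_pos]
      rw [if_neg (by omega : ¬ ((i : Int) < 0))]
      simp only [Int.toNat_natCast]
      rw [pvA_loop2]
      simp only [hi, hget, dif_pos]
      by_cases hs : PySem.Str.isIn "steps:" line = true
      · simp only [hs, if_pos]
        rw [pvB_phase2 fl jn si rest (i + 1) (-1) hdrop]
        rw [if_neg (by omega : ¬ ((i : Int) < 0))]
        simp only [Int.toNat_natCast]
      · simp only [hs, Bool.false_eq_true, reduceIte]
        exact pvB_phase1 fl jn si rest (i + 1) (-1) hdrop
    · simp only [pvB_go, pvA_loop1, hj, Bool.false_eq_true, reduceIte]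
      exact ih (i + 1) hdrop

-- ===== VERDICT (by name: the statement is the Claim_ definition above) =====
theorem find_step_line_number_py_spec : Claim_equal_find_step_line_number_py := by
  intro fl jn si _
  unfold Spec_find_step_line_number_py find_step_line_number_py find_step_line_number_py_alt
  exact (pvB_phase0 fl jn si fl 0 (by simp)).symm
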